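-- pv_equiv track=rewrite | github.com/bradfordlynch/great_leader_skill | great_leader.py | concatenate_text_items
-- ===== SOURCE A (Python) =====
-- def concatenate_text_items(items):
--     """
--     Merges items into a text string that will sound natural as spoken word
--
--     Args:
--         items (list): Items to concatenate
--
--     Returns:
--         (str): Natural sounding list of items
--     """
--     nat_list = ""
--
--     for i, elem in enumerate(items):
--         nat_list += elem
--
--         if i < len(items) - 2:
--             nat_list += ', '
--         elif i == len(items) - 2:
--             nat_list += ', and '
--
--     return nat_list
-- ===== SOURCE B (Python) =====
-- def concatenate_text_items(items):
--     """
--     Merges items into a text string that will sound natural as spoken word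
--
--     Args:
--         items (list): Items to concatenate
--
--     Returns:
--         (str): Natural sounding list of items
--     """
--     if not items:
--         return ""
--     if len(items) == 1:
--         return items[0]
--     return ", ".join(items[:-1]) + ", and " + items[-1]
-- ===== Notes on version B (the rewrite author's own statement) =====
-- stated objective: simpler
-- what changed: Replaces the per-element enumerate loop with index-dependent branching by an explicit split into empty / singleton / general cases, joining the prefix items[:-1] with ', ' in one bulk join and appending ', and ' plus the last element.
import Mathlib
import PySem

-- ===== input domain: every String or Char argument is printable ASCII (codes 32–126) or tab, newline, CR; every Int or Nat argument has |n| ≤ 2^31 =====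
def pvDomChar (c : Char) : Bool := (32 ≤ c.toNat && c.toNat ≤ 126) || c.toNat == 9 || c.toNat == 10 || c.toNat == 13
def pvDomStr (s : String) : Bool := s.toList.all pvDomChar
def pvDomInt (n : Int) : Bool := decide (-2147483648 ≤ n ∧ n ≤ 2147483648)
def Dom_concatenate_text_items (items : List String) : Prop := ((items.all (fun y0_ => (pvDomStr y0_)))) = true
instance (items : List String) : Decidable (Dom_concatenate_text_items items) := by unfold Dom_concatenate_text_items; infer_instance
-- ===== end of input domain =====

-- B replaces A's enumerate loop with index branching by an empty/singleton/general case split and one bulk join of items[:-1] (simpler; same cost).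

-- ===== PORT A =====
def concatenate_text_items (items : List String) : String :=
  (PySem.List.enumerate items).foldl
    (fun nat_list ie =>
      let nat_list := nat_list ++ ie.2
      if ie.1 < (items.length : Int) - 2 then nat_list ++ ", "
      else if ie.1 = (items.length : Int) - 2 then nat_list ++ ", and "
      else nat_list) ""

-- ===== PORT B =====
def concatenate_text_items_alt (items : List String) : String :=
  match items with
  | [] => ""
  | [x] => x
  | x :: y :: rest =>
      PySem.Str.join ", " (PySem.List.slice (x :: y :: rest) none (some (-1)))
        ++ ", and " ++ (y :: rest).getLast (List.cons_ne_nil y rest)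

-- ===== PRECONDITION & SPEC =====
def Spec_concatenate_text_items (items : List String) (out : String) : Prop := out = concatenate_text_items_alt items
instance (items : List String) (out : String) : Decidable (Spec_concatenate_text_items items out) := by unfold Spec_concatenate_text_items; infer_instance

-- ===== CLAIM (what is proved, stated in full; the proofs are below) =====
def Claim_equal_concatenate_text_items : Prop := ∀ (items : List String), Dom_concatenate_text_items items → Spec_concatenate_text_items items (concatenate_text_items items)

-- ===== LEMMAS AND PROOFS =====

-- the body of A's loop, with the total length n fixed
def pvStepA (n : Int) (nat_list : String) (ie : Int × String) : String :=
  let nat_list := nat_list ++ ie.2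
  if ie.1 < n - 2 then nat_list ++ ", "
  else if ie.1 = n - 2 then nat_list ++ ", and "
  else nat_list

theorem pvStr_join_singleton (sep a : String) : PySem.Str.join sep [a] = a := by
  simp [PySem.Str.join, PySem.Chars.join_singleton]

theorem pvStr_join_cons_cons (sep a b : String) (l : List String) :
    PySem.Str.join sep (a :: b :: l) = a ++ sep ++ PySem.Str.join sep (b :: l) := by
  simp [PySem.Str.join, PySem.Chars.join_cons_cons, String.append_assoc]

-- shifting the accumulator out of A's fold
theorem pvFold_acc (n : Int) (ps : List (Int × String)) (acc : String) :
    ps.foldl (pvStepA n) acc = acc ++ ps.foldl (pvStepA n) "" := by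
  induction ps generalizing acc with
  | nil => simp
  | cons p ps ih =>
      simp only [List.foldl_cons]
      rw [ih, ih (pvStepA n "" p)]
      simp [pvStepA, String.append_assoc]
      split_ifs <;> simp [String.append_assoc]

-- A's fold over the prefix (all indices < n-2) then the last two elements
theorem pvFold_prefix (l : List String) (y z : String) (k : Nat) (n : Int)
    (hn : n = k + l.length + 2) :
    (PySem.List.enumerate (l ++ [y, z]) k).foldl (pvStepA n) "" =
      PySem.Str.join ", " (l ++ [y]) ++ ", and " ++ z := by
  induction l generalizing k with
  | nil =>
      have hn' : n = (k : Int) + 2 := by simpa using hn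
      have h1 : ¬((k : Int) < n - 2) := by omega
      have h2 : (k : Int) = n - 2 := by omega
      have h3 : ¬((k : Int) + 1 < n - 2) := by omega
      have h4 : ¬((k : Int) + 1 = n - 2) := by omega
      simp [PySem.List.enumerate_cons, PySem.List.enumerate_nil, pvStepA,
        h2, pvStr_join_singleton, String.append_assoc]
  | cons a l ih =>
      have hn' : n = (k : Int) + l.length + 3 := by
        simp [List.length_cons] at hn; omega
      have hlt : (k : Int) < n - 2 := by omega
      simp only [List.cons_append, PySem.List.enumerate_cons, List.foldl_cons]
      rw [pvFold_acc]
      have hih := ih (k + 1) (by omega)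
      push_cast at hih
      rw [hih]
      have hstep : pvStepA n "" ((k : Int), a) = a ++ ", " := by
        simp [pvStepA, hlt]
      rw [hstep]
      rcases l with _ | ⟨b, l⟩
      · simp [pvStr_join_cons_cons, pvStr_join_singleton, String.append_assoc]
      · simp only [List.cons_append]
        rw [pvStr_join_cons_cons ", " a b (l ++ [y])]
        simp [String.append_assoc]

theorem pv_split_last_two (x y : String) (rest : List String) :
    ∃ l p q, x :: y :: rest = l ++ [p, q] := by
  induction rest generalizing x y with
  | nil => exact ⟨[], x, y, rfl⟩
  | cons r rs ih =>
      obtain ⟨l, p, q, h⟩ := ih y r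
      exact ⟨x :: l, p, q, by simp [h]⟩

theorem pvA_eq (items : List String) :
    concatenate_text_items items = (PySem.List.enumerate items 0).foldl (pvStepA (items.length : Int)) "" := by
  rfl

-- ===== VERDICT (by name: the statement is the Claim_ definition above) =====
theorem concatenate_text_items_spec : Claim_equal_concatenate_text_items := by
  intro items hdom
  unfold Spec_concatenate_text_items
  clear hdom
  rcases items with _ | ⟨x, _ | ⟨y, rest⟩⟩
  · rfl
  · rfl
  · -- split off the last two elements: x :: y :: rest = l ++ [p, q]
    obtain ⟨l, p, q, hlq⟩ := pv_split_last_two x y rest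
    rw [pvA_eq]
    conv_lhs => rw [hlq]
    have hp := pvFold_prefix l p q 0 (((l ++ [p, q]).length : Nat) : Int)
      (by simp [List.length_append])
    simp only [Nat.cast_zero] at hp
    rw [hp]
    have h1 : (x :: y :: rest).dropLast = l ++ [p] := by rw [hlq]; simp
    have hq : (y :: rest).getLast? = some q := by
      have h := congrArg List.getLast? hlq
      simpa using h
    have h2 : (y :: rest).getLast (List.cons_ne_nil y rest) = q := by
      rw [List.getLast?_eq_some_getLast (List.cons_ne_nil y rest)] at hq
      exact Option.some.inj hq
    simp only [concatenate_text_items_alt]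
    rw [PySem.List.slice_to_neg_one, h1, h2]
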